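-- pv_equiv track=rewrite | github.com/linisastald/Loot-Tracker-PF1e | utilities/lstreaderandinput.py | get_priority
-- ===== SOURCE A (Python) =====
-- def get_priority(lstsource):
--     priorities = {
--         'roleplaying_game': 0,
--         'adventure_path': 1,
--         'campaign_setting': 2,
--         'player_companion': 3
--     }
--     for path, priority in priorities.items():
--         if path in lstsource:
--             return priority
--     return 4  # Lower priority for any other path
-- ===== SOURCE B (Python) =====
-- def get_priority(lstsource):
--     priorities = {
--         'roleplaying_game': 0,
--         'adventure_path': 1,
--         'campaign_setting': 2,
--         'player_companion': 3
--     }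
--     matched = [p for path, p in priorities.items() if path in lstsource]
--     return min(matched) if matched else 4
-- ===== Notes on version B (the rewrite author's own statement) =====
-- stated objective: alternative
-- what changed: Replaces the early-return scan over the priorities dict by a collect-all comprehension of every matching priority followed by a min-reduction (correct because the table lists priorities in ascending order, so the first match equals the minimum).
import Mathlib
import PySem

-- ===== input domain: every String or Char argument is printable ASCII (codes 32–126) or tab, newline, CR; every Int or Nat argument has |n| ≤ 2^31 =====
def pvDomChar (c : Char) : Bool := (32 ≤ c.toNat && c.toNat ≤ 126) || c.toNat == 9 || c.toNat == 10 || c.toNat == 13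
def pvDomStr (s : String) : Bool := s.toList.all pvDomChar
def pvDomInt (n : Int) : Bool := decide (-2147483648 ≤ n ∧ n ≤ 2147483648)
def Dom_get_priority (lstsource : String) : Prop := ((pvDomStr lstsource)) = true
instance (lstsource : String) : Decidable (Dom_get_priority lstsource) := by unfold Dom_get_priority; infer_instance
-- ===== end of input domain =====

-- B collects all matching priorities with a comprehension and reduces with min (default 4) instead of A's early-return scan; alternative decomposition, same cost.
-- ===== PORT A =====
def pvPriorities : List (String × Int) :=
  [("roleplaying_game", 0), ("adventure_path", 1), ("campaign_setting", 2), ("player_companion", 3)]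

-- the for-loop over priorities.items() with early return
def pvLoopA : List (String × Int) → String → Int
  | [], _ => 4
  | (path, priority) :: rest, lstsource =>
    if PySem.Str.isIn path lstsource then priority else pvLoopA rest lstsource

def get_priority (lstsource : String) : Int := pvLoopA pvPriorities lstsource

-- ===== PORT B =====
def get_priority_alt (lstsource : String) : Int :=
  let matched := (pvPriorities.filter (fun pp => PySem.Str.isIn pp.1 lstsource)).map (·.2)
  match PySem.List.min? matched (fun x => x) with
  | some m => m
  | none => 4

-- ===== PRECONDITION & SPEC =====
def Spec_get_priority (lstsource : String) (out : Int) : Prop := out = get_priority_alt lstsource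
instance (lstsource : String) (out : Int) : Decidable (Spec_get_priority lstsource out) := by unfold Spec_get_priority; infer_instance

-- ===== CLAIM (what is proved, stated in full; the proofs are below) =====
def Claim_equal_get_priority : Prop := ∀ (lstsource : String), Dom_get_priority lstsource → Spec_get_priority lstsource (get_priority lstsource)

-- ===== LEMMAS AND PROOFS =====

-- ===== VERDICT (by name: the statement is the Claim_ definition above) =====
theorem get_priority_spec : Claim_equal_get_priority := by
  intro lstsource _
  unfold Spec_get_priority get_priority get_priority_alt pvPriorities
  by_cases h1 : PySem.Str.isIn "roleplaying_game" lstsource <;>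
  by_cases h2 : PySem.Str.isIn "adventure_path" lstsource <;>
  by_cases h3 : PySem.Str.isIn "campaign_setting" lstsource <;>
  by_cases h4 : PySem.Str.isIn "player_companion" lstsource <;>
  simp [PySem.Str.isIn] at h1 h2 h3 h4 <;>
    simp [pvLoopA, h1, h2, h3, h4, PySem.List.min?, List.filter]
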